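-- pv_equiv track=rewrite | github.com/NatnaelMalike/Competitive-Programming | 2025-redistribute-characters-to-make-all-strings-equal/2025-redistribute-characters-to-make-all-strings-equal.py | makeEqual
-- ===== SOURCE A (Python) =====
-- from typing import List
--
-- def makeEqual(words: List[str]) -> bool:
--     longStr = ''.join(words)
--     myDict = {}
--     for i in longStr:
--         if i in myDict:
--             myDict[i] += 1
--         else:
--             myDict[i] = 1
--
--     for val in myDict.values():
--         if val % len(words) != 0:
--             return False
--     return True
-- ===== SOURCE B (Python) =====
-- def makeEqual(words):
--     n = len(words)
--     s = sorted(''.join(words))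
--     i = 0
--     while i < len(s):
--         j = i + 1
--         while j < len(s) and s[j] == s[i]:
--             j += 1
--         if (j - i) % n != 0:
--             return False
--         i = j
--     return True
-- ===== Notes on version B (the rewrite author's own statement) =====
-- stated objective: alternative
-- what changed: B sorts the joined characters and scans maximal runs of equal characters, checking each run length for divisibility by len(words), instead of A's single-pass dict tally followed by a pass over the dict values.
import Mathlib
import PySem

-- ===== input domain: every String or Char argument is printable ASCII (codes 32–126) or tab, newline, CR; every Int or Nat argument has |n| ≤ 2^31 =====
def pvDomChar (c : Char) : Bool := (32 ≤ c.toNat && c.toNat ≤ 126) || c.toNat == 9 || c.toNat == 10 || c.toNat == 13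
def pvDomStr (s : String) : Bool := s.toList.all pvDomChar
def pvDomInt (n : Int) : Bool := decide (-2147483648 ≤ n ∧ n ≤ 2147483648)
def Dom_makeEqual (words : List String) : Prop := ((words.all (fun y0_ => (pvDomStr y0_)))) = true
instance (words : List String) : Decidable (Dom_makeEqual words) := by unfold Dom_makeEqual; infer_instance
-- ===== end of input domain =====

-- B sorts the joined characters and checks each maximal run's length for divisibility by len(words), replacing A's dict tally; alternative algorithm, same result.


-- ===== PORT A =====
def makeEqual (words : List String) : Bool :=
  let longStr := PySem.Str.join "" words
  let myDict : PySem.Dict Char Int := longStr.toList.foldl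
    (fun d i => if d.contains i then d.insert i (d.getD i 0 + 1) else d.insert i 1)
    PySem.Dict.empty
  myDict.values.all (fun v => PySem.Int.mod v (words.length : Int) == 0)

-- ===== PORT B =====
-- B's outer while loop advances i to j past the maximal run of s[i]; ported as
-- structural recursion where the inner 'while s[j] == s[i]: j += 1' scan is
-- takeWhile/dropWhile on the remaining suffix (the same run split).
def runScan (n : Int) : List Char → Bool
  | [] => true
  | c :: t =>
    if PySem.Int.mod (((t.takeWhile (fun x => x == c)).length + 1 : Nat) : Int) n == 0 then
      runScan n (t.dropWhile (fun x => x == c))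
    else false
termination_by l => l.length
decreasing_by
  exact Nat.lt_succ_of_le (t.length_dropWhile_le _)

def makeEqual_alt (words : List String) : Bool :=
  let n : Int := words.length
  let s := PySem.List.sorted (PySem.Str.join "" words).toList (fun x => x) false
  runScan n s

-- ===== PRECONDITION & SPEC =====
def Spec_makeEqual (words : List String) (out : Bool) : Prop := out = makeEqual_alt words
instance (words : List String) (out : Bool) : Decidable (Spec_makeEqual words out) := by unfold Spec_makeEqual; infer_instance

-- ===== CLAIM (what is proved, stated in full; the proofs are below) =====
def Claim_equal_makeEqual : Prop := ∀ (words : List String), Dom_makeEqual words → Spec_makeEqual words (makeEqual words)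

-- ===== LEMMAS AND PROOFS =====

-- Python ''.join(words) flattens the character lists.
theorem pv_join_empty_toList (words : List String) :
    (PySem.Str.join "" words).toList = (words.map String.toList).flatten := by
  rw [PySem.Str.toList_join]
  show PySem.Chars.join [] (words.map String.toList) = _
  simp only [PySem.Chars.join, List.intercalate]
  induction words.map String.toList with
  | nil => rfl
  | cons x xs ih => cases xs <;> simp_all [List.intersperse]

-- A's tally loop is collections.Counter.
theorem pv_fold_eq_counter (L : List Char) :
    L.foldl (fun d i => if d.contains i then d.insert i (d.getD i 0 + 1) else d.insert i 1)
      PySem.Dict.empty = PySem.Dict.counter L := by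
  have hf : (fun (d : PySem.Dict Char Int) i =>
      if d.contains i then d.insert i (d.getD i 0 + 1) else d.insert i 1)
      = fun d i => d.insert i (d.getD i 0 + 1) := by
    funext d i
    by_cases h : d.contains i = true
    · simp [h]
    · simp only [Bool.not_eq_true] at h
      simp [h, PySem.Dict.getD_of_not_contains d 0 h]
  rw [hf, PySem.Dict.foldl_insert_getD_add_one_eq_counter]

-- A returns true iff every character of the joined string has total count divisible by n.
theorem pv_A_iff (words : List String) :
    makeEqual words = true ↔
      ∀ c ∈ (words.map String.toList).flatten,
        PySem.Int.mod ((((words.map String.toList).flatten.count c : Nat) : Int))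
          (words.length : Int) = 0 := by
  unfold makeEqual
  simp only [pv_fold_eq_counter, pv_join_empty_toList]
  set L := (words.map String.toList).flatten with hL
  rw [PySem.Dict.values_eq_map_keys _ (PySem.Dict.nodup_keys_counter L) (0 : Int),
      PySem.Dict.keys_counter, List.all_map, List.all_eq_true]
  constructor
  · intro h c hc
    have := h c (by rwa [PySem.Set.mem_ofList])
    simpa [PySem.Dict.getD_counter] using this
  · intro h c hc
    rw [PySem.Set.mem_ofList] at hc
    simpa [PySem.Dict.getD_counter] using h c hc

-- B's run scan on a sorted list succeeds iff every member's count is divisible by n.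
theorem pv_runScan_iff (n : Int) (L : List Char) (hs : L.Pairwise (· ≤ ·)) :
    runScan n L = true ↔
      ∀ c ∈ L, PySem.Int.mod ((L.count c : Nat) : Int) n = 0 := by
  induction hk : L.length using Nat.strong_induction_on generalizing L with
  | _ k ih =>
    cases L with
    | nil => simp [runScan]
    | cons c t =>
      have htq := (List.takeWhile_append_dropWhile (p := fun x => x == c) (l := t)).symm
      set run := t.takeWhile (fun x => x == c) with hrun
      set rest := t.dropWhile (fun x => x == c) with hrest
      have hrunall : ∀ x ∈ run, x = c := by
        intro x hx
        rw [hrun] at hx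
        exact eq_of_beq (List.mem_takeWhile_imp (p := fun y => y == c) hx)
      have hcrest : c ∉ rest := by
        intro hmem
        cases hR : rest with
        | nil => simp [hR] at hmem
        | cons h0 r0 =>
          have hne : ¬ (h0 == c) = true := by
            have hhd := List.head?_dropWhile_not (fun x => x == c) t
            rw [← hrest, hR] at hhd
            simp only [List.head?_cons] at hhd
            simp [hhd]
          have hle : ∀ x ∈ t, c ≤ x := (List.pairwise_cons.mp hs).1
          have hh0t : h0 ∈ t := by rw [htq, hR]; simp
          have hch0 : c < h0 := lt_of_le_of_ne (hle _ hh0t) (fun h => hne (beq_iff_eq.mpr h.symm))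
          have hpt : t.Pairwise (· ≤ ·) := (List.pairwise_cons.mp hs).2
          have hprest : rest.Pairwise (· ≤ ·) := by
            rw [htq] at hpt; exact (List.pairwise_append.mp hpt).2.1
          rw [hR] at hmem hprest
          rcases List.mem_cons.mp hmem with h | h
          · exact absurd h (ne_of_lt hch0)
          · exact absurd ((List.pairwise_cons.mp hprest).1 c h) (not_le.mpr hch0)
      have hcount_c : (c :: t).count c = run.length + 1 := by
        rw [htq]
        have h1 : run.count c = run.length := List.count_eq_length.mpr
          (by intro x hx; exact ((hrunall x hx).symm : c = x) ▸ rfl)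
        have h2 : rest.count c = 0 := List.count_eq_zero.mpr hcrest
        simp [List.count_append, h1, h2]
      have hcount_d : ∀ d, d ≠ c → (c :: t).count d = rest.count d := by
        intro d hd
        have h1 : run.count d = 0 := List.count_eq_zero.mpr
          (fun hmem => hd (hrunall d hmem))
        rw [htq]
        simp [List.count_append, h1, Ne.symm hd]
      have hmem_d : ∀ d, d ≠ c → (d ∈ c :: t ↔ d ∈ rest) := by
        intro d hd
        rw [htq]
        simp [List.mem_cons, List.mem_append, hd]
        intro h; exact absurd (hrunall d h) hd
      have hprest : rest.Pairwise (· ≤ ·) := by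
        have hpt : t.Pairwise (· ≤ ·) := (List.pairwise_cons.mp hs).2
        rw [htq] at hpt; exact (List.pairwise_append.mp hpt).2.1
      have hlen : rest.length < k := by
        have h1 := t.length_dropWhile_le (fun x => x == c)
        rw [← hrest] at h1
        have hk' : t.length + 1 = k := by simpa using hk
        omega
      have hIH := ih rest.length hlen rest hprest rfl
      rw [runScan]
      constructor
      · intro h d hd
        split at h
        · next hdiv =>
          by_cases hdc : d = c
          · subst hdc
            rw [hcount_c]
            exact of_decide_eq_true (by simpa using hdiv)
          · rw [hcount_d d hdc]
            exact (hIH.mp h) d ((hmem_d d hdc).mp hd)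
        · exact absurd h (by simp)
      · intro h
        have hdiv : PySem.Int.mod ((run.length + 1 : Nat) : Int) n = 0 := by
          have := h c (List.mem_cons_self)
          rwa [hcount_c] at this
        rw [if_pos (by simpa using hdiv)]
        refine hIH.mpr ?_
        intro d hd
        have hdc : d ≠ c := fun hdc => hcrest (hdc ▸ hd)
        have := h d ((hmem_d d hdc).mpr hd)
        rwa [hcount_d d hdc] at this

-- ===== VERDICT (by name: the statement is the Claim_ definition above) =====
theorem makeEqual_spec : Claim_equal_makeEqual := by
  intro words _
  show makeEqual words = makeEqual_alt words
  rw [Bool.eq_iff_iff, pv_A_iff]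
  unfold makeEqual_alt
  simp only [pv_join_empty_toList]
  set J := (words.map String.toList).flatten with hJ
  set S := PySem.List.sorted J (fun x => x) false with hS
  have hperm : S.Perm J := PySem.List.sorted_perm J _ _
  have hpair : S.Pairwise (· ≤ ·) := PySem.List.sorted_pairwise J _
  rw [pv_runScan_iff _ _ hpair]
  constructor
  · intro h c hc
    rw [hperm.count_eq]
    exact h c (hperm.mem_iff.mp hc)
  · intro h c hc
    have := h c (hperm.mem_iff.mpr hc)
    rwa [hperm.count_eq] at this
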